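-- pv_equiv track=rewrite | github.com/jaredj/chorpro-simplify | streamlit_app.py | transform_middle
-- ===== SOURCE A (Python) =====
-- def transform_middle(middle_section):
--     transformed_middle = []
--     prev_was_chord = False
--     for el in middle_section:
--         if el['type'] == 'space':
--             if not prev_was_chord:
--                 transformed_middle.append({'type': 'space', 'content': ' '})
--         else:
--             transformed_middle.append(el)
--             if el['type'] == 'chord':
--                 prev_was_chord = True
--             else:
--                 prev_was_chord = False
--     return transformed_middle
-- ===== SOURCE B (Python) =====
-- def transform_middle(middle_section):
--     # Run-based rewrite: scan maximal runs of spaces at once; emit a whole run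
--     # of normalized spaces unless the last non-space element was a chord.
--     out = []
--     i = 0
--     n = len(middle_section)
--     last_nonspace_type = None
--     while i < n:
--         el = middle_section[i]
--         if el['type'] == 'space':
--             j = i
--             while j < n and middle_section[j]['type'] == 'space':
--                 j += 1
--             if last_nonspace_type != 'chord':
--                 out.extend({'type': 'space', 'content': ' '} for _ in range(j - i))
--             i = j
--         else:
--             out.append(el)
--             last_nonspace_type = el['type']
--             i += 1
--     return out
-- ===== Notes on version B (the rewrite author's own statement) =====
-- stated objective: alternative
-- what changed: Replaces the per-element loop with a boolean prev_was_chord flag by a run-based scan: maximal runs of consecutive spaces are consumed at once and emitted (or dropped) as a whole block depending on the last non-space element's type.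
-- outside the precondition, e.g. on transform_middle([{'content': 'x'}]): A raises KeyError, B raises KeyError
import Mathlib
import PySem

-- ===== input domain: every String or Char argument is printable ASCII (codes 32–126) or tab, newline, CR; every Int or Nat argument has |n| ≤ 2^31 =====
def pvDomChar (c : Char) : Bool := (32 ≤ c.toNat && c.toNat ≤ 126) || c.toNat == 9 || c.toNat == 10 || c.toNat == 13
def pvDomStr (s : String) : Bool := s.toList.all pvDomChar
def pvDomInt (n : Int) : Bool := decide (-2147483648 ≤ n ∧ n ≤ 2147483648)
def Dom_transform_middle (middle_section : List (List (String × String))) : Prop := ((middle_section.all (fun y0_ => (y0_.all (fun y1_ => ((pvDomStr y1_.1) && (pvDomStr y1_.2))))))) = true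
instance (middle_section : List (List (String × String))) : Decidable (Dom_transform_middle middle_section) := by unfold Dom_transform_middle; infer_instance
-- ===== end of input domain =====

-- B replaces A's per-element loop with a prev_was_chord flag by a run-based scan that
-- consumes each maximal run of spaces at once (objective: alternative decomposition).

-- el['type'] : first match in the association list; "" only outside Pre_ (where Python raises KeyError)
def tyOf (el : List (String × String)) : String := (List.lookup "type" el).getD ""

-- the normalized space dict {'type': 'space', 'content': ' '}
def spaceEl : List (String × String) := [("type", "space"), ("content", " ")]

-- ===== PORT A =====
def transform_middle (middle_section : List (List (String × String))) : List (List (String × String)) :=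
  (middle_section.foldl
    (fun (st : List (List (String × String)) × Bool) el =>
      if tyOf el = "space" then
        if st.2 = false then (st.1 ++ [spaceEl], st.2) else st
      else
        (st.1 ++ [el], decide (tyOf el = "chord")))
    ([], false)).1

-- ===== PORT B =====
-- the inner `while j < n and ...[j]['type']=='space'` scan: (length of space run, remainder)
def takeSpaces : List (List (String × String)) → Nat × List (List (String × String))
  | [] => (0, [])
  | el :: rest =>
    if tyOf el = "space" then
      let p := takeSpaces rest
      (p.1 + 1, p.2)
    else (0, el :: rest)

theorem takeSpaces_len (xs : List (List (String × String))) : (takeSpaces xs).2.length ≤ xs.length := by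
  induction xs with
  | nil => simp [takeSpaces]
  | cons el rest ih =>
    simp only [takeSpaces]
    split
    · simpa using le_trans ih (Nat.le_succ _)
    · simp

def altLoop : Option String → List (List (String × String)) → List (List (String × String))
  | _, [] => []
  | last, el :: rest =>
    if tyOf el = "space" then
      let p := takeSpaces rest
      (if last ≠ some "chord" then List.replicate (p.1 + 1) spaceEl else []) ++ altLoop last p.2
    else el :: altLoop (some (tyOf el)) rest
termination_by _ xs => xs.length
decreasing_by
  · exact Nat.lt_succ_of_le (takeSpaces_len rest)
  · simp

def transform_middle_alt (middle_section : List (List (String × String))) : List (List (String × String)) :=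
  altLoop none middle_section

-- ===== PRECONDITION & SPEC =====
-- Pre_ excludes exactly the inputs where an element lacks a 'type' key, on which Python A raises KeyError.
def Pre_transform_middle (middle_section : List (List (String × String))) : Prop :=
  ∀ el ∈ middle_section, (List.lookup "type" el).isSome = true
instance (middle_section : List (List (String × String))) : Decidable (Pre_transform_middle middle_section) := by unfold Pre_transform_middle; infer_instance

def pvWitness_transform_middle : (List (List (String × String))) :=
  [[("type", "chord"), ("content", "C")], [("type", "space"), ("content", " ")], [("type", "word"), ("content", "la")]]

def Spec_transform_middle (middle_section : List (List (String × String))) (out : List (List (String × String))) : Prop := out = transform_middle_alt middle_section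
instance (middle_section : List (List (String × String))) (out : List (List (String × String))) : Decidable (Spec_transform_middle middle_section out) := by unfold Spec_transform_middle; infer_instance

-- ===== CLAIM (what is proved, stated in full; the proofs are below) =====
def Claim_equal_transform_middle : Prop := ∀ (middle_section : List (List (String × String))), Dom_transform_middle middle_section → Pre_transform_middle middle_section → Spec_transform_middle middle_section (transform_middle middle_section)

-- ===== LEMMAS AND PROOFS =====

-- A's loop as a direct output-building recursion over the same Bool state
def aRec : Bool → List (List (String × String)) → List (List (String × String))
  | _, [] => []
  | b, el :: rest =>
    if tyOf el = "space" then
      (if b = false then [spaceEl] else []) ++ aRec b rest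
    else el :: aRec (decide (tyOf el = "chord")) rest

theorem foldl_eq_aRec (xs : List (List (String × String))) :
    ∀ (acc : List (List (String × String))) (b : Bool),
    (xs.foldl
      (fun (st : List (List (String × String)) × Bool) el =>
        if tyOf el = "space" then
          if st.2 = false then (st.1 ++ [spaceEl], st.2) else st
        else
          (st.1 ++ [el], decide (tyOf el = "chord")))
      (acc, b)).1 = acc ++ aRec b xs := by
  induction xs with
  | nil => intro acc b; simp [aRec]
  | cons el rest ih =>
    intro acc b
    simp only [List.foldl_cons, aRec]
    by_cases hs : tyOf el = "space"
    · cases b <;> simp [hs, ih]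
    · simp [hs, ih]

theorem aRec_spaces (xs : List (List (String × String))) (b : Bool) :
    aRec b xs = (if b = false then List.replicate (takeSpaces xs).1 spaceEl else []) ++ aRec b (takeSpaces xs).2 := by
  induction xs with
  | nil => cases b <;> simp [takeSpaces]
  | cons el rest ih =>
    by_cases hs : tyOf el = "space"
    · cases b <;> simp [aRec, takeSpaces, hs, ih, List.replicate_succ]
    · cases b <;> simp [takeSpaces, hs]

theorem aRec_eq_altLoop : ∀ (n : Nat) (xs : List (List (String × String))), xs.length ≤ n →
    ∀ (last : Option String), aRec (decide (last = some "chord")) xs = altLoop last xs := by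
  intro n
  induction n with
  | zero =>
    intro xs hl last
    have : xs = [] := List.length_eq_zero_iff.mp (Nat.le_zero.mp hl)
    subst this; simp [aRec, altLoop]
  | succ n ih =>
    intro xs hl last
    cases xs with
    | nil => simp [aRec, altLoop]
    | cons el rest =>
      by_cases hs : tyOf el = "space"
      · have hr : (takeSpaces rest).2.length ≤ n :=
          le_trans (takeSpaces_len rest) (Nat.le_of_succ_le_succ hl)
        rw [altLoop]
        simp only [hs, if_pos]
        rw [aRec]
        simp only [hs, if_pos]
        rw [aRec_spaces rest, ih _ hr last]
        by_cases hc : last = some "chord"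
        · simp [hc]
        · simp [hc, List.replicate_succ]
      · have hr : rest.length ≤ n := Nat.le_of_succ_le_succ hl
        rw [altLoop, aRec]
        have hdec : decide (tyOf el = "chord") = decide ((some (tyOf el) : Option String) = some "chord") := by
          simp
        rw [hdec, ih _ hr (some (tyOf el))]
        simp [hs]

-- ===== VERDICT (by name: the statement is the Claim_ definition above) =====
theorem transform_middle_spec : Claim_equal_transform_middle := by
  intro ms _ _
  show transform_middle ms = transform_middle_alt ms
  unfold transform_middle transform_middle_alt
  rw [foldl_eq_aRec ms [] false]
  have h := aRec_eq_altLoop ms.length ms (le_refl _) none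
  simpa using h
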